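-- pv_equiv track=rewrite | github.com/epilectrik/voynich | phases/E_EXTENSION_ROUTING_TEST/scripts/03_pp_ri_e_distribution.py | count_consecutive_e
-- ===== SOURCE A (Python) =====
-- def count_consecutive_e(word):
--     """Count maximum consecutive e's in a word."""
--     max_consec = 0
--     current = 0
--     for c in word:
--         if c == 'e':
--             current += 1
--             max_consec = max(max_consec, current)
--         else:
--             current = 0
--     return max_consec
-- ===== SOURCE B (Python) =====
-- def count_consecutive_e(word):
--     """Count maximum consecutive e's in a word (run-length encode, then reduce)."""
--     runs = []
--     i, n = 0, len(word)
--     while i < n: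
--         j = i
--         while j < n and word[j] == word[i]:
--             j += 1
--         runs.append((word[i], j - i))
--         i = j
--     return max((length for ch, length in runs if ch == 'e'), default=0)
-- ===== Notes on version B (the rewrite author's own statement) =====
-- stated objective: alternative
-- what changed: B run-length encodes the word into (char, run length) pairs and then takes the max length over the runs whose character is 'e' (default 0), instead of threading a running counter and running maximum through a single character loop.
import Mathlib
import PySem

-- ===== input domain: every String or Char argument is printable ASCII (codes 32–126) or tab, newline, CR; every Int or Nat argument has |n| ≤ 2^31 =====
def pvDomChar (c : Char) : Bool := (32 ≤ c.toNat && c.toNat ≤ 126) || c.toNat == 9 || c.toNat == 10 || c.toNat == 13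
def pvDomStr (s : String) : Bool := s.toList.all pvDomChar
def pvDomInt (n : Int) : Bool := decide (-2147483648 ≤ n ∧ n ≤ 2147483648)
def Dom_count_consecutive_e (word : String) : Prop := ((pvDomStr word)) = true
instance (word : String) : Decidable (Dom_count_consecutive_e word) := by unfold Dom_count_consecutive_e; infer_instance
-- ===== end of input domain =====

-- B replaces A's running-counter/running-max loop by run-length encoding the word
-- into (char, run length) pairs and taking the max over the 'e' runs (default 0).

-- ===== PORT A =====
-- A's for-loop over the characters, threading (max_consec, current).
def pvStepA (st : Int × Int) (c : Char) : Int × Int :=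
  if c = 'e' then (max st.1 (st.2 + 1), st.2 + 1) else (st.1, 0)

def count_consecutive_e (word : String) : Int :=
  (word.toList.foldl pvStepA (0, 0)).1

-- ===== PORT B =====
-- run-length encoding: Source B's outer while loop (inner while = the span of equal chars)
def pvRuns : List Char → List (Char × Nat)
  | [] => []
  | c :: cs =>
    (c, 1 + (cs.takeWhile (· == c)).length) :: pvRuns (cs.dropWhile (· == c))
termination_by l => l.length
decreasing_by
  simpa using Nat.lt_succ_of_le (List.length_dropWhile_le (· == c) cs)

def count_consecutive_e_alt (word : String) : Int :=
  ((pvRuns word.toList).filterMap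
      (fun kn => if kn.1 = 'e' then some ((kn.2 : Int)) else none)).foldl max 0

-- ===== PRECONDITION & SPEC =====
def Spec_count_consecutive_e (word : String) (out : Int) : Prop := out = count_consecutive_e_alt word
instance (word : String) (out : Int) : Decidable (Spec_count_consecutive_e word out) := by unfold Spec_count_consecutive_e; infer_instance

-- ===== CLAIM (what is proved, stated in full; the proofs are below) =====
def Claim_equal_count_consecutive_e : Prop := ∀ (word : String), Dom_count_consecutive_e word → Spec_count_consecutive_e word (count_consecutive_e word)

-- ===== LEMMAS AND PROOFS =====

-- B's value on a list, for use in the induction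
def pvEMax (l : List Char) : Int :=
  ((pvRuns l).filterMap
      (fun kn => if kn.1 = 'e' then some ((kn.2 : Int)) else none)).foldl max 0

lemma foldl_max_shift (L : List Int) : ∀ a b : Int, L.foldl max (max a b) = max a (L.foldl max b) := by
  induction L with
  | nil => intro a b; simp
  | cons x xs ih =>
    intro a b
    have h : max (max a b) x = max a (max b x) := by omega
    simp only [List.foldl, h, ih]

-- A's loop over an all-'e' prefix
lemma foldA_all_e (p : List Char) (hp : ∀ x ∈ p, x = 'e') :
    ∀ m c : Int, c ≤ m → p.foldl pvStepA (m, c) = (max m (c + p.length), c + p.length) := by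
  induction p with
  | nil => intro m c h; simp; omega
  | cons x xs ih =>
    intro m c h
    have hx : x = 'e' := hp x (by simp)
    have hxs : ∀ y ∈ xs, y = 'e' := fun y hy => hp y (by simp [hy])
    simp only [List.foldl, pvStepA, hx, if_true]
    rw [ih hxs (max m (c + 1)) (c + 1) (by omega)]
    simp only [Prod.mk.injEq, List.length_cons]
    push_cast
    omega

-- A's loop over an all-non-'e' prefix leaves the state unchanged when current = 0
lemma foldA_no_e (p : List Char) (hp : ∀ x ∈ p, x ≠ 'e') (m : Int) :
    p.foldl pvStepA (m, 0) = (m, 0) := by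
  induction p with
  | nil => rfl
  | cons x xs ih =>
    have hx : x ≠ 'e' := hp x (by simp)
    have hxs : ∀ y ∈ xs, y ≠ 'e' := fun y hy => hp y (by simp [hy])
    simp only [List.foldl, pvStepA, if_neg hx]
    exact ih hxs

-- after a run, the first component does not depend on 'current' if the next char is not 'e'
lemma foldA_reset (r : List Char) (hr : ∀ h t, r = h :: t → h ≠ 'e') (M k : Int) :
    (r.foldl pvStepA (M, k)).1 = (r.foldl pvStepA (M, 0)).1 := by
  cases r with
  | nil => rfl
  | cons h t =>
    have hh : h ≠ 'e' := hr h t rfl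
    simp only [List.foldl, pvStepA, if_neg hh]

lemma pvEMax_cons_e (cs : List Char) :
    pvEMax ('e' :: cs) =
      max (1 + ((cs.takeWhile (· == 'e')).length : Int)) (pvEMax (cs.dropWhile (· == 'e'))) := by
  unfold pvEMax
  rw [pvRuns]
  simp only [List.filterMap, reduceIte, List.foldl]
  have := foldl_max_shift
    (((pvRuns (cs.dropWhile (· == 'e'))).filterMap
      (fun kn => if kn.1 = 'e' then some ((kn.2 : Int)) else none)))
    (1 + ((cs.takeWhile (· == 'e')).length : Int)) 0
  have h0 : max (0 : Int) (1 + ((cs.takeWhile (· == 'e')).length : Int))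
      = max (1 + ((cs.takeWhile (· == 'e')).length : Int)) (0 : Int) := by omega
  push_cast at *
  rw [h0, this]

lemma pvEMax_cons_ne (c : Char) (hc : c ≠ 'e') (cs : List Char) :
    pvEMax (c :: cs) = pvEMax (cs.dropWhile (· == c)) := by
  unfold pvEMax
  rw [pvRuns]
  simp [List.filterMap, if_neg hc]

lemma pvEMax_nonneg (l : List Char) : 0 ≤ pvEMax l := by
  unfold pvEMax
  generalize ((pvRuns l).filterMap _) = L
  have : ∀ (b : Int), b ≤ L.foldl max b := by
    induction L with
    | nil => intro b; simp
    | cons x xs ih => intro b; exact le_trans (le_max_left b x) (ih _)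
  exact this 0

-- head of a dropWhile fails the predicate
lemma pvDropWhile_head (p : Char → Bool) : ∀ (l : List Char) (h : Char) (t : List Char),
    l.dropWhile p = h :: t → ¬ p h = true := by
  intro l
  induction l with
  | nil => intro h t hh; simp [List.dropWhile] at hh
  | cons x xs ih =>
    intro h t hh
    by_cases hx : p x
    · rw [List.dropWhile_cons_of_pos hx] at hh; exact ih h t hh
    · rw [List.dropWhile_cons_of_neg hx] at hh
      injection hh with h1 _
      exact h1 ▸ hx

-- main invariant: A's fold starting from (m, 0) computes max m (pvEMax l)
lemma mainA : ∀ n (l : List Char), l.length ≤ n → ∀ m : Int, 0 ≤ m →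
    (l.foldl pvStepA (m, 0)).1 = max m (pvEMax l) := by
  intro n
  induction n with
  | zero =>
    intro l hl m hm
    have : l = [] := List.eq_nil_of_length_eq_zero (Nat.le_zero.mp hl)
    subst this
    simp [pvEMax, pvRuns]
    omega
  | succ n ih =>
    intro l hl m hm
    cases l with
    | nil => simp [pvEMax, pvRuns]; omega
    | cons c cs =>
      have hsplit : cs.takeWhile (· == c) ++ cs.dropWhile (· == c) = cs :=
        List.takeWhile_append_dropWhile
      have hpc : ∀ x ∈ cs.takeWhile (· == c), x = c := by
        intro x hx
        simpa using List.mem_takeWhile_imp hx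
      have hrlen : (cs.dropWhile (· == c)).length ≤ n := by
        have h1 := List.length_dropWhile_le (· == c) cs
        have h2 : cs.length ≤ n := by simpa using hl
        omega
      have hrhead : ∀ h t, cs.dropWhile (· == c) = h :: t → ¬ (h == c) = true :=
        fun h t ht => pvDropWhile_head _ cs h t ht
      by_cases hc : c = 'e'
      · subst hc
        have hpe : ∀ x ∈ cs.takeWhile (· == 'e'), x = 'e' := hpc
        have hstep : pvStepA (m, 0) 'e' = (max m 1, 1) := by
          simp [pvStepA]
        have hfold : ('e' :: cs).foldl pvStepA (m, 0)
            = (cs.dropWhile (· == 'e')).foldl pvStepA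
                (max (max m 1) (1 + ((cs.takeWhile (· == 'e')).length : Int)),
                 1 + ((cs.takeWhile (· == 'e')).length : Int)) := by
          simp only [List.foldl, hstep]
          conv_lhs => rw [← hsplit]
          rw [List.foldl_append,
            foldA_all_e _ hpe (max m 1) 1 (le_max_right m 1)]
        rw [hfold]
        rw [foldA_reset _ (fun h t ht => by simpa using hrhead h t ht)]
        rw [ih _ hrlen _ (by omega)]
        rw [pvEMax_cons_e]
        omega
      · have hpne : ∀ x ∈ cs.takeWhile (· == c), x ≠ 'e' :=
          fun x hx => (hpc x hx) ▸ hc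
        have hstep : pvStepA (m, 0) c = (m, 0) := by
          simp [pvStepA, hc]
        have hfold : (c :: cs).foldl pvStepA (m, 0)
            = (cs.dropWhile (· == c)).foldl pvStepA (m, 0) := by
          simp only [List.foldl, hstep]
          conv_lhs => rw [← hsplit]
          rw [List.foldl_append, foldA_no_e _ hpne m]
        rw [hfold, ih _ hrlen _ hm, pvEMax_cons_ne c hc]

-- ===== VERDICT (by name: the statement is the Claim_ definition above) =====
theorem count_consecutive_e_spec : Claim_equal_count_consecutive_e := by
  intro word _
  unfold Spec_count_consecutive_e count_consecutive_e count_consecutive_e_alt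
  have := mainA word.toList.length word.toList le_rfl 0 le_rfl
  rw [this]
  have := pvEMax_nonneg word.toList
  unfold pvEMax at *
  omega
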